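-- pv_equiv track=rewrite | github.com/VladSilin/EPIJudge | epi_judge_python/nearest_repeated_entries.py | find_nearest_repetition0
-- ===== SOURCE A (Python) =====
-- from typing import List
--
-- def find_nearest_repetition0(paragraph: List[str]) -> int:
--     closest_distance = float('inf')
--     for i in range(len(paragraph)):
--         distance = 0
--         is_word_found = False
--         for j in range(i + 1, len(paragraph)):
--             if paragraph[i] == paragraph[j]:
--                 is_word_found = True
--                 distance += 1
--                 break
--
--             distance += 1
--
--         if not is_word_found:
--             distance = float('inf')
--
--         if distance < closest_distance:
--             closest_distance = distance
--
--     return -1 if closest_distance == float('inf') else closest_distance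
-- ===== SOURCE B (Python) =====
-- def find_nearest_repetition0(paragraph):
--     last = {}
--     best = -1
--     for i, w in enumerate(paragraph):
--         if w in last:
--             d = i - last[w]
--             if best == -1 or d < best:
--                 best = d
--         last[w] = i
--     return best
-- ===== Notes on version B (the rewrite author's own statement) =====
-- stated objective: faster
-- what changed: Replaces the quadratic scan (for each word, scan forward for the next equal word) by a single pass keeping a dict of each word's last-seen index and tracking the minimum gap.
import Mathlib
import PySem

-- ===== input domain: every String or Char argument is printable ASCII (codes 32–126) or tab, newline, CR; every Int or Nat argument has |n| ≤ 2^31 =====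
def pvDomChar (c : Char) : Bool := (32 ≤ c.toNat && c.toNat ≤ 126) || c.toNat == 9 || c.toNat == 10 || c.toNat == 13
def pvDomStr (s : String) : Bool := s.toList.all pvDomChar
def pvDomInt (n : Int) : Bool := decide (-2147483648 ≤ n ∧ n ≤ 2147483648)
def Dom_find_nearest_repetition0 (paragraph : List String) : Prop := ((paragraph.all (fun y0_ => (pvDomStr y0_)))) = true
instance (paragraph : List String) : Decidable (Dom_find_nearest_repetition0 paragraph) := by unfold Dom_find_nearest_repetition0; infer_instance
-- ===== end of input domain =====

-- B replaces A's O(n^2) forward scan per word by one pass with a dict of last-seen indices (O(n)).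

-- ===== PORT A =====
-- 'closest_distance'/'distance' take the value float('inf') only as a sentinel for "no match";
-- we port that sentinel as 'none : Option Int' (never as a float value).
def pvOptLt (a b : Option Int) : Bool :=
  match a, b with
  | some x, some y => decide (x < y)
  | some _, none => true          -- any int < inf
  | none, _ => false              -- inf < anything is false

-- inner 'for j in range(i+1, len(paragraph))' with break; returns (distance, is_word_found)
def pvInnerA (p : List String) (i : Int) : List Int → Int → Int × Bool
  | [], distance => (distance, false)
  | j :: rest, distance =>
    if PySem.List.pyGet? p i = PySem.List.pyGet? p j then (distance + 1, true)
    else pvInnerA p i rest (distance + 1)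

-- outer 'for i in range(len(paragraph))'
def pvOuterA (p : List String) : List Int → Option Int → Option Int
  | [], closest => closest
  | i :: rest, closest =>
    let r := pvInnerA p i (PySem.List.pyRange (i + 1) (p.length : Int) 1) 0
    let distance : Option Int := if r.2 then some r.1 else none
    let closest' := if pvOptLt distance closest then distance else closest
    pvOuterA p rest closest'

def find_nearest_repetition0 (paragraph : List String) : Int :=
  match pvOuterA paragraph (PySem.List.pyRange 0 (paragraph.length : Int) 1) none with
  | none => -1
  | some d => d

-- ===== PORT B =====
-- 'last[w]' is guarded by 'w in last' in Source B, so 'getD w 0' is exact here (never the default).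
def pvLoopB : List (Int × String) → PySem.Dict String Int → Int → Int
  | [], _, best => best
  | (i, w) :: rest, last, best =>
    let best' :=
      if last.contains w then
        let d := i - last.getD w 0
        if best = -1 ∨ d < best then d else best
      else best
    pvLoopB rest (last.insert w i) best'

def find_nearest_repetition0_alt (paragraph : List String) : Int :=
  pvLoopB (PySem.List.enumerate paragraph 0) PySem.Dict.empty (-1)

-- ===== PRECONDITION & SPEC =====
def Spec_find_nearest_repetition0 (paragraph : List String) (out : Int) : Prop := out = find_nearest_repetition0_alt paragraph
instance (paragraph : List String) (out : Int) : Decidable (Spec_find_nearest_repetition0 paragraph out) := by unfold Spec_find_nearest_repetition0; infer_instance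

-- ===== CLAIM (what is proved, stated in full; the proofs are below) =====
def Claim_equal_find_nearest_repetition0 : Prop := ∀ (paragraph : List String), Dom_find_nearest_repetition0 paragraph → Spec_find_nearest_repetition0 paragraph (find_nearest_repetition0 paragraph)

-- ===== LEMMAS AND PROOFS =====

-- There is no pair i < j < k (j in range) of equal words.
def pvNoPair (p : List String) (k : Nat) : Prop :=
  ∀ i j : Nat, i < j → j < k → j < p.length → p[i]? ≠ p[j]?

-- d is the minimum gap j - i over pairs of equal words with j < k.
def pvMinPair (p : List String) (k : Nat) (d : Int) : Prop :=
  (∃ i j : Nat, i < j ∧ j < k ∧ j < p.length ∧ p[i]? = p[j]? ∧ d = (j : Int) - (i : Int)) ∧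
  (∀ i j : Nat, i < j → j < k → j < p.length → p[i]? = p[j]? → d ≤ (j : Int) - (i : Int))

def pvAns (p : List String) (k : Nat) (r : Int) : Prop :=
  (r = -1 ∧ pvNoPair p k) ∨ pvMinPair p k r

lemma pvAns_unique (p : List String) (r s : Int)
    (hr : pvAns p p.length r) (hs : pvAns p p.length s) : r = s := by
  rcases hr with ⟨hr1, hrnp⟩ | ⟨⟨i, j, hij, hjk, hjl, he, hrd⟩, hrb⟩
  · rcases hs with ⟨hs1, _⟩ | ⟨⟨i, j, hij, hjk, hjl, he, hsd⟩, _⟩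
    · omega
    · exact absurd he (hrnp i j hij hjk hjl)
  · rcases hs with ⟨hs1, hsnp⟩ | ⟨⟨i', j', hij', hjk', hjl', he', hsd⟩, hsb⟩
    · exact absurd he (hsnp i j hij hjk hjl)
    · have h1 := hsb i j hij hjk hjl he
      have h2 := hrb i' j' hij' hjk' hjl' he'
      omega

-- ---------- A side ----------

-- variant of pvNoPair/pvMinPair with the FIRST index bounded (A's outer loop goes by i)
def pvNoPairA (p : List String) (k : Nat) : Prop :=
  ∀ i j : Nat, i < k → i < j → j < p.length → p[i]? ≠ p[j]?

def pvMinPairA (p : List String) (k : Nat) (d : Int) : Prop :=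
  (∃ i j : Nat, i < k ∧ i < j ∧ j < p.length ∧ p[i]? = p[j]? ∧ d = (j : Int) - (i : Int)) ∧
  (∀ i j : Nat, i < k → i < j → j < p.length → p[i]? = p[j]? → d ≤ (j : Int) - (i : Int))

def pvStateA (p : List String) (k : Nat) (c : Option Int) : Prop :=
  (c = none ∧ pvNoPairA p k) ∨ (∃ d, c = some d ∧ pvMinPairA p k d)

lemma pvInnerA_none (p : List String) (i' : Nat) :
    ∀ (c k : Nat) (d : Int), p.length - k = c →
    (∀ j : Nat, k ≤ j → j < p.length → p[i']? ≠ p[j]?) →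
    (pvInnerA p (i' : Int) (PySem.List.pyRange (k : Int) (p.length : Int) 1) d).2 = false := by
  intro c
  induction c with
  | zero =>
    intro k d hc _
    rw [PySem.List.pyRange_one_eq_nil (by exact_mod_cast Nat.le_of_sub_eq_zero hc)]
    rfl
  | succ c ih =>
    intro k d hc hno
    have hk : k < p.length := by omega
    rw [PySem.List.pyRange_one_cons (by exact_mod_cast hk)]
    simp only [pvInnerA, PySem.List.pyGet?_natCast]
    rw [if_neg (hno k le_rfl hk)]
    have : ((k : Int) + 1) = ((k + 1 : Nat) : Int) := by push_cast; ring
    rw [this]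
    exact ih (k + 1) (d + 1) (by omega) (fun j hj hjl => hno j (by omega) hjl)

lemma pvInnerA_found (p : List String) (i' j : Nat) (hjl : j < p.length) (heq : p[i']? = p[j]?) :
    ∀ (c k : Nat) (d : Int), j - k = c → k ≤ j →
    (∀ j' : Nat, k ≤ j' → j' < j → p[i']? ≠ p[j']?) →
    pvInnerA p (i' : Int) (PySem.List.pyRange (k : Int) (p.length : Int) 1) d
      = (d + ((j : Int) - (k : Int) + 1), true) := by
  intro c
  induction c with
  | zero =>
    intro k d hc hkj _
    have hkj' : k = j := by omega
    subst hkj'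
    rw [PySem.List.pyRange_one_cons (by exact_mod_cast hjl)]
    simp only [pvInnerA, PySem.List.pyGet?_natCast]
    rw [if_pos heq]
    norm_num
  | succ c ih =>
    intro k d hc hkj hmin
    have hkj' : k < j := by omega
    rw [PySem.List.pyRange_one_cons (by exact_mod_cast (by omega : k < p.length))]
    simp only [pvInnerA, PySem.List.pyGet?_natCast]
    rw [if_neg (hmin k le_rfl hkj')]
    have hcast : ((k : Int) + 1) = ((k + 1 : Nat) : Int) := by push_cast; ring
    rw [hcast, ih (k + 1) (d + 1) (by omega) (by omega)
      (fun j' hj' hj'2 => hmin j' (by omega) hj'2)]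
    congr 1
    push_cast
    ring

lemma pvOuterA_spec (p : List String) :
    ∀ (c k : Nat) (cl : Option Int), p.length - k = c → k ≤ p.length → pvStateA p k cl →
    pvStateA p p.length (pvOuterA p (PySem.List.pyRange (k : Int) (p.length : Int) 1) cl) := by
  intro c
  induction c with
  | zero =>
    intro k cl hc hkle hst
    have hkk : k = p.length := by omega
    rw [PySem.List.pyRange_one_eq_nil (by exact_mod_cast (Nat.le_of_sub_eq_zero hc))]
    rwa [hkk] at hst
  | succ c ih =>
    intro k cl hc hkle hst
    have hk : k < p.length := by omega
    rw [PySem.List.pyRange_one_cons (by exact_mod_cast hk)]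
    simp only [pvOuterA]
    have hcast : ((k : Int) + 1) = ((k + 1 : Nat) : Int) := by push_cast; ring
    by_cases hex : ∃ j : Nat, k < j ∧ j < p.length ∧ p[k]? = p[j]?
    · -- a later equal word exists; the inner loop finds the first one
      have hex' : ∃ j : Nat, k < j ∧ j < p.length ∧ p[k]? = p[j]? := hex
      let j0 := Nat.find hex'
      obtain ⟨hkj0, hj0l, hj0e⟩ : k < j0 ∧ j0 < p.length ∧ p[k]? = p[j0]? := Nat.find_spec hex'
      have hmin : ∀ j' : Nat, k + 1 ≤ j' → j' < j0 → p[k]? ≠ p[j']? := by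
        intro j' h1 h2 hne
        exact Nat.find_min hex' h2 ⟨by omega, by omega, hne⟩
      have hinner := pvInnerA_found p k j0 hj0l hj0e (j0 - (k + 1)) (k + 1) 0 rfl (by omega) hmin
      rw [hcast, hinner]
      simp only []
      have hgap : (0 : Int) + ((j0 : Int) - ((k + 1 : Nat) : Int) + 1) = (j0 : Int) - (k : Int) := by
        push_cast; ring
      rw [hgap]
      -- every pair starting at k has gap ≥ j0 - k
      have hbest_at_k : ∀ j : Nat, k < j → j < p.length → p[k]? = p[j]? →
          (j0 : Int) - (k : Int) ≤ (j : Int) - (k : Int) := by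
        intro j h1 h2 h3
        have : j0 ≤ j := Nat.find_min' hex' ⟨h1, h2, h3⟩
        omega
      rcases hst with ⟨hcl, hnp⟩ | ⟨e, hcl, ⟨wit, hbd⟩⟩
      · subst hcl
        simp only [pvOptLt, if_pos]
        apply ih (k + 1) _ (by omega) (by omega)
        right
        refine ⟨(j0 : Int) - (k : Int), rfl, ⟨k, j0, Nat.lt_succ_self k, hkj0, hj0l, hj0e, rfl⟩, ?_⟩
        intro i j hik hij hjl he
        rcases Nat.lt_or_ge i k with h | h
        · exact absurd he (hnp i j h hij hjl)
        · have : i = k := by omega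
          subst this
          exact hbest_at_k j hij hjl he
      · subst hcl
        simp only [pvOptLt]
        by_cases hlt : (j0 : Int) - (k : Int) < e
        · rw [if_pos (by simpa using hlt)]
          apply ih (k + 1) _ (by omega) (by omega)
          right
          refine ⟨(j0 : Int) - (k : Int), rfl, ⟨k, j0, Nat.lt_succ_self k, hkj0, hj0l, hj0e, rfl⟩, ?_⟩
          intro i j hik hij hjl he
          rcases Nat.lt_or_ge i k with h | h
          · have := hbd i j h hij hjl he; omega
          · have : i = k := by omega
            subst this
            exact hbest_at_k j hij hjl he
        · rw [if_neg (by simpa using hlt)]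
          apply ih (k + 1) _ (by omega) (by omega)
          right
          obtain ⟨i0, j0', h1, h2, h3, h4, h5⟩ := wit
          refine ⟨e, rfl, ⟨i0, j0', by omega, h2, h3, h4, h5⟩, ?_⟩
          intro i j hik hij hjl he
          rcases Nat.lt_or_ge i k with h | h
          · exact hbd i j h hij hjl he
          · have : i = k := by omega
            subst this
            have := hbest_at_k j hij hjl he
            omega
    · -- no later equal word: inner loop reports not found, closest unchanged
      have hno : ∀ j : Nat, k + 1 ≤ j → j < p.length → p[k]? ≠ p[j]? := by
        intro j h1 h2 hne
        exact hex ⟨j, by omega, h2, hne⟩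
      have hinner := pvInnerA_none p k (p.length - (k + 1)) (k + 1) 0 rfl hno
      rw [hcast]
      have hX : (if (pvInnerA p (k : Int) (PySem.List.pyRange ((k + 1 : Nat) : Int) (p.length : Int) 1) 0).2 = true then
          some (pvInnerA p (k : Int) (PySem.List.pyRange ((k + 1 : Nat) : Int) (p.length : Int) 1) 0).1 else none) = (none : Option Int) := by
        rw [hinner]
        simp
      rw [hX]
      have hopt : pvOptLt none cl = false := rfl
      rw [hopt]
      simp only [Bool.false_eq_true, if_false]
      have hst' : pvStateA p (k + 1) cl := by
        rcases hst with ⟨hcl, hnp⟩ | ⟨e, hcl, ⟨wit, hbd⟩⟩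
        · left
          refine ⟨hcl, ?_⟩
          intro i j hik hij hjl he
          rcases Nat.lt_or_ge i k with h | h
          · exact hnp i j h hij hjl he
          · have : i = k := by omega
            subst this
            exact hno j (by omega) hjl he
        · right
          obtain ⟨i0, j0', h1, h2, h3, h4, h5⟩ := wit
          refine ⟨e, hcl, ⟨i0, j0', by omega, h2, h3, h4, h5⟩, ?_⟩
          intro i j hik hij hjl he
          rcases Nat.lt_or_ge i k with h | h
          · exact hbd i j h hij hjl he
          · have : i = k := by omega
            subst this
            exact absurd he (hno j (by omega) hjl)
      exact ih (k + 1) cl (by omega) (by omega) hst'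

lemma pvA_ans (p : List String) : pvAns p p.length (find_nearest_repetition0 p) := by
  have h0 : pvStateA p 0 none := Or.inl ⟨rfl, fun i j hik _ _ _ => absurd hik (Nat.not_lt_zero i)⟩
  have h := pvOuterA_spec p p.length 0 none (by omega) (by omega) h0
  unfold find_nearest_repetition0
  have hz : (0 : Int) = ((0 : Nat) : Int) := rfl
  rw [hz]
  rcases h with ⟨hcl, hnp⟩ | ⟨d, hcl, ⟨wit, hbd⟩⟩
  · rw [hcl]
    left
    exact ⟨rfl, fun i j hij hjk hjl => hnp i j (by omega) hij hjl⟩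
  · rw [hcl]
    right
    obtain ⟨i0, j0, h1, h2, h3, h4, h5⟩ := wit
    exact ⟨⟨i0, j0, h2, h3, h3, h4, h5⟩, fun i j hij hjk hjl he => hbd i j (by omega) hij hjl he⟩

-- ---------- B side ----------

-- the dict maps each word of p[0:k] to its last index there
def pvLastInv (p : List String) (k : Nat) (last : PySem.Dict String Int) : Prop :=
  (∀ w v, last.get? w = some v →
    ∃ m : Nat, v = (m : Int) ∧ m < k ∧ p[m]? = some w ∧
      ∀ m' : Nat, m < m' → m' < k → p[m']? ≠ some w) ∧
  (∀ m : Nat, m < k → ∀ w, p[m]? = some w → last.contains w = true)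

lemma pvMinPair_ne_neg_one (p : List String) (k : Nat) (d : Int)
    (h : pvMinPair p k d) : d ≠ -1 := by
  obtain ⟨⟨i, j, hij, _, _, _, hd⟩, _⟩ := h
  omega

lemma pvLoopB_spec (p : List String) :
    ∀ (rest : List String) (k : Nat) (last : PySem.Dict String Int) (best : Int),
    p.drop k = rest → pvLastInv p k last → pvAns p k best →
    pvAns p p.length (pvLoopB (PySem.List.enumerate rest (k : Int)) last best) := by
  intro rest
  induction rest with
  | nil =>
    intro k last best hdrop _ hans
    have hk : p.length ≤ k := by
      have := congrArg List.length hdrop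
      simp [List.length_drop] at this
      omega
    simp only [PySem.List.enumerate_nil, pvLoopB]
    rcases hans with ⟨h1, h2⟩ | ⟨⟨i, j, hij, hjk, hjl, he, hd⟩, hbd⟩
    · exact Or.inl ⟨h1, fun i j hij hjk hjl => h2 i j hij (by omega) hjl⟩
    · exact Or.inr ⟨⟨i, j, hij, hjl, hjl, he, hd⟩, fun i j hij hjk hjl he => hbd i j hij (by omega) hjl he⟩
  | cons w rs ihr =>
    intro k last best hdrop hinv hans
    have hkw : p[k]? = some w := by
      have : (p.drop k)[0]? = some w := by rw [hdrop]; rfl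
      rwa [List.getElem?_drop, Nat.add_zero] at this
    have hkl : k < p.length := (List.getElem?_eq_some_iff.mp hkw).1
    have hdrop' : p.drop (k + 1) = rs := by
      have ht := List.tail_drop (l := p) (i := k)
      rw [← ht, hdrop]; rfl
    rw [PySem.List.enumerate_cons]
    simp only [pvLoopB]
    have hcast : ((k : Int) + 1) = ((k + 1 : Nat) : Int) := by push_cast; ring
    obtain ⟨hget, hcont⟩ := hinv
    -- the new dict satisfies the invariant at k+1
    have hinv' : pvLastInv p (k + 1) (last.insert w (k : Int)) := by
      constructor
      · intro w' v hv
        rw [PySem.Dict.get?_insert] at hv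
        by_cases hw : w' = w
        · rw [if_pos hw] at hv
          refine ⟨k, by exact (Option.some.injEq _ _).mp hv |>.symm, Nat.lt_succ_self k, by rw [hw]; exact hkw, ?_⟩
          intro m' h1 h2
          omega
        · rw [if_neg hw] at hv
          obtain ⟨m, h1, h2, h3, h4⟩ := hget w' v hv
          refine ⟨m, h1, by omega, h3, ?_⟩
          intro m' hm1 hm2 hme
          rcases Nat.lt_or_ge m' k with h | h
          · exact h4 m' hm1 h hme
          · have : m' = k := by omega
            subst this
            rw [hkw] at hme
            exact hw ((Option.some.injEq _ _).mp hme).symm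
      · intro m hm w' hw'
        rw [PySem.Dict.contains_insert]
        rcases Nat.lt_or_ge m k with h | h
        · rw [hcont m h w' hw']
          simp
        · have : m = k := by omega
          subst this
          rw [hkw] at hw'
          have : w' = w := ((Option.some.injEq _ _).mp hw').symm
          simp [this]
    rw [hcast]
    by_cases hc : last.contains w = true
    · -- a previous occurrence exists
      rw [if_pos hc]
      have hsome : (last.get? w).isSome := by
        rw [← PySem.Dict.contains_eq_isSome_get?, hc]
      obtain ⟨v, hv⟩ := Option.isSome_iff_exists.mp hsome
      obtain ⟨m, hvm, hmk, hpm, hmax⟩ := hget w v hv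
      have hgetD : last.getD w 0 = (m : Int) := by
        rw [PySem.Dict.getD_of_get?_eq_some last 0 hv, hvm]
      rw [hgetD]
      -- gap to the last occurrence is minimal among pairs ending at k
      have hk_min : ∀ i : Nat, i < k → p[i]? = p[k]? →
          (k : Int) - (m : Int) ≤ (k : Int) - (i : Int) := by
        intro i hik hie
        rw [hkw] at hie
        have : i ≤ m := by
          by_contra h
          exact hmax i (by omega) hik hie
        omega
      have hmkpair : p[m]? = p[k]? := by rw [hpm, hkw]
      apply ihr (k + 1) _ _ hdrop' hinv'
      rcases hans with ⟨h1, hnp⟩ | hmp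
      · rw [if_pos (Or.inl h1)]
        right
        refine ⟨⟨m, k, hmk, Nat.lt_succ_self k, hkl, hmkpair, rfl⟩, ?_⟩
        intro i j hij hjk hjl he
        rcases Nat.lt_or_ge j k with h | h
        · exact absurd he (hnp i j hij h hjl)
        · have : j = k := by omega
          subst this
          exact hk_min i hij he
      · have hne := pvMinPair_ne_neg_one p k best hmp
        obtain ⟨⟨i0, j0, h1, h2, h3, h4, h5⟩, hbd⟩ := hmp
        by_cases hlt : (k : Int) - (m : Int) < best
        · rw [if_pos (Or.inr hlt)]
          right
          refine ⟨⟨m, k, hmk, Nat.lt_succ_self k, hkl, hmkpair, rfl⟩, ?_⟩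
          intro i j hij hjk hjl he
          rcases Nat.lt_or_ge j k with h | h
          · have := hbd i j hij h hjl he; omega
          · have : j = k := by omega
            subst this
            exact hk_min i hij he
        · rw [if_neg (by push Not; exact ⟨hne, not_lt.mp hlt⟩)]
          right
          refine ⟨⟨i0, j0, h1, by omega, h3, h4, h5⟩, ?_⟩
          intro i j hij hjk hjl he
          rcases Nat.lt_or_ge j k with h | h
          · exact hbd i j hij h hjl he
          · have : j = k := by omega
            subst this
            have := hk_min i hij he
            omega
    · -- first occurrence of w: no pair ends at k
      rw [if_neg hc]
      have hnok : ∀ i : Nat, i < k → p[i]? ≠ p[k]? := by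
        intro i hik hie
        rw [hkw] at hie
        rw [hcont i hik w hie] at hc
        exact hc rfl
      apply ihr (k + 1) _ _ hdrop' hinv'
      rcases hans with ⟨h1, hnp⟩ | ⟨⟨i0, j0, h1, h2, h3, h4, h5⟩, hbd⟩
      · left
        refine ⟨h1, ?_⟩
        intro i j hij hjk hjl he
        rcases Nat.lt_or_ge j k with h | h
        · exact hnp i j hij h hjl he
        · have : j = k := by omega
          subst this
          exact hnok i hij he
      · right
        refine ⟨⟨i0, j0, h1, by omega, h3, h4, h5⟩, ?_⟩
        intro i j hij hjk hjl he
        rcases Nat.lt_or_ge j k with h | h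
        · exact hbd i j hij h hjl he
        · have : j = k := by omega
          subst this
          exact absurd he (hnok i hij)

lemma pvB_ans (p : List String) : pvAns p p.length (find_nearest_repetition0_alt p) := by
  unfold find_nearest_repetition0_alt
  have hz : (0 : Int) = ((0 : Nat) : Int) := rfl
  rw [hz]
  apply pvLoopB_spec p p 0 PySem.Dict.empty (-1) rfl
  · constructor
    · intro w v hv
      rw [PySem.Dict.get?_empty] at hv
      exact absurd hv (by simp)
    · intro m hm
      exact absurd hm (Nat.not_lt_zero m)
  · exact Or.inl ⟨rfl, fun i j hij hjk _ => absurd hjk (Nat.not_lt_zero j)⟩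

-- ===== VERDICT (by name: the statement is the Claim_ definition above) =====
theorem find_nearest_repetition0_spec : Claim_equal_find_nearest_repetition0 := by
  intro p _
  exact pvAns_unique p _ _ (pvA_ans p) (pvB_ans p)
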